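-- pv_equiv track=rewrite | github.com/alecerio/NeuralCasting | neural_cast/frontend/parser/ops/common/common.py | gen_for_loop_index
-- ===== SOURCE A (Python) =====
-- def gen_for_loop_index(shape : list[int]) -> str:
--     code : str = ""
--     n_dims : int = len(shape)
--     first : int = n_dims
--     for i in range(n_dims):
--         if shape[i] != 0:
--             first = i
--             break
--     if first == n_dims:
--         return "0"
--     for i in range(first+1, n_dims):
--         index : str = "i" + str(i)
--         size : int = 1
--         for j in range(i+1, n_dims):
--             size *= shape[j]
--         code += index + "*" + str(size)
--         if i < n_dims-1:
--             code += " + "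
--     return code
-- ===== SOURCE B (Python) =====
-- def gen_for_loop_index(shape: list[int]) -> str:
--     n = len(shape)
--     first = next((i for i, s in enumerate(shape) if s != 0), n)
--     if first == n:
--         return "0"
--     # one backward pass: running suffix product replaces A's inner loop
--     terms = []
--     p = 1
--     for i in range(n - 1, first, -1):
--         terms.append("i" + str(i) + "*" + str(p))
--         p *= shape[i]
--     return " + ".join(reversed(terms))
-- ===== Notes on version B (the rewrite author's own statement) =====
-- stated objective: alternative
-- what changed: A recomputes the stride of every dimension with a nested product loop; B makes one backward pass that maintains a running suffix product, collects the terms, and joins them once (measured ~1.7x at n=1024, but not confirmed at the largest size, where bigint products dominate both).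
import Mathlib
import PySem

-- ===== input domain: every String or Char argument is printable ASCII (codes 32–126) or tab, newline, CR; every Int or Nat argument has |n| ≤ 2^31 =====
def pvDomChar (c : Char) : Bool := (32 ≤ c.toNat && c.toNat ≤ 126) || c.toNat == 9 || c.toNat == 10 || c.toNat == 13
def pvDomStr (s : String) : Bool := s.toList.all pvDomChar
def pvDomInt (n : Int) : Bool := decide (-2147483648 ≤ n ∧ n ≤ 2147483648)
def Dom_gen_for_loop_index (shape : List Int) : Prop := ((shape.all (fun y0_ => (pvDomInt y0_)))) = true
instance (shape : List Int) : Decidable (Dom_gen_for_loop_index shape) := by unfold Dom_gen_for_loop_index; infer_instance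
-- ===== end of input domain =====

-- B replaces A's nested inner product loop by a single backward pass keeping a
-- running suffix product, joining the collected terms at the end (objective: alternative;
-- fewer multiplications, though bigint growth dominates at large sizes).

-- ===== PORT A =====
-- A's first loop ('for i in range(n): if shape[i] != 0: first = i; break') as structural
-- recursion: index of the first nonzero entry, or the length if none.
def pvAFirst : List Int → Nat
  | [] => 0
  | x :: xs => if x ≠ 0 then 0 else pvAFirst xs + 1

def gen_for_loop_index (shape : List Int) : String :=
  let n : Int := shape.length
  let first : Int := pvAFirst shape
  if first = n then "0"
  else
    (PySem.List.pyRange (first + 1) n 1).foldl (fun code i =>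
      let index := "i" ++ PySem.Int.toStr i
      let size := (PySem.List.pyRange (i + 1) n 1).foldl
        (fun s j => s * PySem.List.pyGetD shape j 0) 1
      let code := code ++ index ++ "*" ++ PySem.Int.toStr size
      if i < n - 1 then code ++ " + " else code) ""

-- ===== PORT B =====
def gen_for_loop_index_alt (shape : List Int) : String :=
  let n : Int := shape.length
  -- first = next((i for i, s in enumerate(shape) if s != 0), n)
  let first : Int := ((shape.findIdx? (fun s => s ≠ 0)).getD shape.length : Nat)
  if first = n then "0"
  else
    -- for i in range(n-1, first, -1): terms.append(...); p *= shape[i]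
    let st := (PySem.List.pyRange (n - 1) first (-1)).foldl
      (fun (st : List String × Int) i =>
        (st.1 ++ ["i" ++ PySem.Int.toStr i ++ "*" ++ PySem.Int.toStr st.2],
         st.2 * PySem.List.pyGetD shape i 0)) ([], 1)
    PySem.Str.join " + " st.1.reverse

-- ===== PRECONDITION & SPEC =====
def Spec_gen_for_loop_index (shape : List Int) (out : String) : Prop := out = gen_for_loop_index_alt shape
instance (shape : List Int) (out : String) : Decidable (Spec_gen_for_loop_index shape out) := by unfold Spec_gen_for_loop_index; infer_instance

-- ===== CLAIM (what is proved, stated in full; the proofs are below) =====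
def Claim_equal_gen_for_loop_index : Prop := ∀ (shape : List Int), Dom_gen_for_loop_index shape → Spec_gen_for_loop_index shape (gen_for_loop_index shape)

-- ===== LEMMAS AND PROOFS =====

-- suffix product of shape from position i (inclusive)
def pvSuff (shape : List Int) (i : Int) : Int := (shape.drop i.toNat).prod

-- the i-th summand of the generated expression
def pvTerm (shape : List Int) (i : Int) : String :=
  "i" ++ PySem.Int.toStr i ++ "*" ++ PySem.Int.toStr (pvSuff shape (i + 1))

-- the common normal form both ports reach
def pvJoin (shape : List Int) (a : Int) : String :=
  PySem.Str.join " + " ((PySem.List.pyRange a shape.length 1).map (pvTerm shape))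

theorem pvAFirst_le (shape : List Int) : pvAFirst shape ≤ shape.length := by
  induction shape with
  | nil => simp [pvAFirst]
  | cons x xs ih =>
    by_cases h : x ≠ 0
    · simp [pvAFirst, h]
    · simp only [pvAFirst, if_neg h, List.length_cons]
      omega

theorem pvFirst_eq (shape : List Int) :
    pvAFirst shape = (shape.findIdx? (fun s => s ≠ 0)).getD shape.length := by
  induction shape with
  | nil => simp [pvAFirst]
  | cons x xs ih =>
    by_cases h : x ≠ 0
    · simp [pvAFirst, h, List.findIdx?_cons]
    · cases hfi : xs.findIdx? (fun s => s ≠ 0) <;>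
        simp [pvAFirst, h, List.findIdx?_cons, hfi] at ih ⊢ <;> omega

theorem pvJoin_empty (sep : String) : PySem.Str.join sep [] = "" := by
  apply String.toList_injective; simp [PySem.Str.toList_join, PySem.Chars.join_nil]

theorem pvJoin_one (sep p : String) : PySem.Str.join sep [p] = p := by
  apply String.toList_injective; simp [PySem.Str.toList_join, PySem.Chars.join_singleton]

theorem pvJoin_cons_cons (sep p q : String) (rest : List String) :
    PySem.Str.join sep (p :: q :: rest) = p ++ sep ++ PySem.Str.join sep (q :: rest) := by
  apply String.toList_injective
  simp [PySem.Str.toList_join, PySem.Chars.join_cons_cons]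

-- A's inner loop computes the suffix product
theorem pvSizeA (shape : List Int) (i : Int) (h : 0 ≤ i) :
    (PySem.List.pyRange (i + 1) shape.length 1).foldl
      (fun s j => s * PySem.List.pyGetD shape j 0) 1 = pvSuff shape (i + 1) := by
  have hb : ((shape.length : Int)) = PySem.List.len shape := by simp
  rw [hb, PySem.List.foldl_pyRange_pyGetD shape 0 (fun s j => s * j) 1 (by omega)]
  rw [pvSuff, List.prod_eq_foldl]

theorem pvSuff_cons (shape : List Int) (a : Int) (h0 : 0 ≤ a) (h : a < shape.length) :
    pvSuff shape a = PySem.List.pyGetD shape a 0 * pvSuff shape (a + 1) := by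
  have ha : a.toNat < shape.length := by omega
  rw [pvSuff, pvSuff, List.drop_eq_getElem_cons ha, List.prod_cons,
    PySem.List.pyGetD_eq_getElem shape 0 h0 (by omega)]
  have h1 : (a + 1).toNat = a.toNat + 1 := by omega
  rw [h1]

theorem pvJoin_step (shape : List Int) (a : Int) (h1 : a + 1 < shape.length) :
    pvJoin shape a = pvTerm shape a ++ " + " ++ pvJoin shape (a + 1) := by
  rw [pvJoin, PySem.List.pyRange_one_cons (by omega), pvJoin]
  rw [PySem.List.pyRange_one_cons (by exact_mod_cast h1)]
  rw [List.map_cons, List.map_cons, pvJoin_cons_cons, ← List.map_cons,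
    ← PySem.List.pyRange_one_cons (by exact_mod_cast h1)]

theorem pvJoin_last (shape : List Int) (a : Int) (h1 : a + 1 = shape.length) :
    pvJoin shape a = pvTerm shape a := by
  rw [pvJoin, PySem.List.pyRange_one_cons (by omega),
    PySem.List.pyRange_one_eq_nil (by omega), List.map_cons, List.map_nil, pvJoin_one]

-- A's main loop appends pvJoin to the accumulated code
theorem pvA_loop (shape : List Int) (a : Int) (code : String)
    (h0 : 0 ≤ a) (h : a < shape.length) :
    (PySem.List.pyRange a shape.length 1).foldl (fun code i =>
      let index := "i" ++ PySem.Int.toStr i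
      let size := (PySem.List.pyRange (i + 1) shape.length 1).foldl
        (fun s j => s * PySem.List.pyGetD shape j 0) 1
      let code := code ++ index ++ "*" ++ PySem.Int.toStr size
      if i < (shape.length : Int) - 1 then code ++ " + " else code) code
    = code ++ pvJoin shape a := by
  generalize hk : ((shape.length : Int) - a).toNat = k
  induction k generalizing a code with
  | zero => omega
  | succ k ih =>
    rw [PySem.List.pyRange_one_cons h, List.foldl_cons]
    by_cases hl : a < (shape.length : Int) - 1
    · simp only [hl, if_pos, pvSizeA shape a h0]
      rw [ih (a + 1) _ (by omega) (by omega) (by omega)]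
      rw [pvJoin_step shape a (by omega)]
      apply String.toList_injective
      simp [pvTerm, String.toList_append]
    · have he : a + 1 = shape.length := by omega
      rw [PySem.List.pyRange_one_eq_nil (by omega), List.foldl_nil]
      have hs : pvSuff shape (a + 1) = 1 := by
        rw [pvSuff, List.drop_eq_nil_of_le (by omega)]; rfl
      simp only [hl, pvJoin_last shape a he]
      apply String.toList_injective
      simp [pvTerm, hs, String.toList_append]

-- B's backward loop: the running product is the suffix product, the collected
-- terms are the reversed map of pvTerm over the forward range
theorem pvB_loop (shape : List Int) (first a : Int) (ts : List String)
    (h0 : 0 ≤ first) (h1 : first ≤ a) (h : a < shape.length) :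
    (PySem.List.pyRange a first (-1)).foldl
      (fun (st : List String × Int) i =>
        (st.1 ++ ["i" ++ PySem.Int.toStr i ++ "*" ++ PySem.Int.toStr st.2],
         st.2 * PySem.List.pyGetD shape i 0)) (ts, pvSuff shape (a + 1))
    = (ts ++ ((PySem.List.pyRange (first + 1) (a + 1) 1).map (pvTerm shape)).reverse,
       pvSuff shape (first + 1)) := by
  generalize hk : (a - first).toNat = k
  induction k generalizing a ts with
  | zero =>
    have ha : a = first := by omega
    subst ha
    rw [PySem.List.pyRange_neg_one_eq_nil le_rfl, List.foldl_nil,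
      PySem.List.pyRange_one_eq_nil (by omega), List.map_nil, List.reverse_nil,
      List.append_nil]
  | succ k ih =>
    have hfa : first < a := by omega
    have hae : a - 1 + 1 = a := by ring
    rw [PySem.List.pyRange_neg_one_cons hfa, List.foldl_cons]
    have hp : pvSuff shape (a + 1) * PySem.List.pyGetD shape a 0 = pvSuff shape ((a - 1) + 1) := by
      rw [hae, pvSuff_cons shape a (by omega) h, mul_comm]
    simp only
    rw [hp, ih (a - 1) _ (by omega) (by omega) (by omega), hae]
    rw [PySem.List.pyRange_one_succ_right (by omega : first + 1 ≤ a)]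
    simp [pvTerm, List.append_assoc]

-- ===== VERDICT (by name: the statement is the Claim_ definition above) =====
theorem gen_for_loop_index_spec : Claim_equal_gen_for_loop_index := by
  intro shape _
  show gen_for_loop_index shape = gen_for_loop_index_alt shape
  rw [gen_for_loop_index, gen_for_loop_index_alt]
  simp only [← pvFirst_eq]
  by_cases hf : ((pvAFirst shape : Int) = (shape.length : Int))
  · simp [hf]
  · have hle := pvAFirst_le shape
    have hfl : (pvAFirst shape : Int) < shape.length := by omega
    rw [if_neg hf, if_neg hf]
    by_cases hone : (pvAFirst shape : Int) + 1 = shape.length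
    · -- single dimension after 'first': both loops are empty, both return ""
      rw [PySem.List.pyRange_one_eq_nil (by omega), List.foldl_nil,
        show ((shape.length : Int) - 1) = (pvAFirst shape : Int) by omega,
        PySem.List.pyRange_neg_one_eq_nil le_rfl, List.foldl_nil]
      simp [pvJoin_empty]
    · have hsn : pvSuff shape ((shape.length : Int) - 1 + 1) = 1 := by
        rw [pvSuff, List.drop_eq_nil_of_le (by omega)]; rfl
      rw [pvA_loop shape _ "" (by omega) (by omega)]
      have hb := pvB_loop shape (pvAFirst shape) ((shape.length : Int) - 1) []
        (by omega) (by omega) (by omega)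
      rw [hsn] at hb
      simp only [hb]
      rw [show ((shape.length : Int) - 1 + 1) = (shape.length : Int) by ring]
      simp [pvJoin]
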